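-- pv_equiv track=rewrite | github.com/dbookstaber/vba-clean | tests/parity_harness.py | _strip_line_continuations
-- ===== SOURCE A (Python) =====
-- from typing import Dict, List, Optional, Tuple
--
-- def _strip_line_continuations(s: str) -> str:
--     # Join lines ending with space + underscore continuation
--     lines = s.split('\n')
--     out: List[str] = []
--     buf = ''
--     for ln in lines:
--         if ln.rstrip().endswith(' _'):
--             buf += ln.rstrip()[:-2]
--         else:
--             if buf:
--                 out.append(buf + ln)
--                 buf = ''
--             else:
--                 out.append(ln)
--     if buf:
--         out.append(buf)
--     return '\n'.join(out)
-- ===== SOURCE B (Python) =====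
-- def _strip_line_continuations(s: str) -> str:
--     # Join lines ending with space + underscore continuation (recursive merge-into-head)
--     def go(lines):
--         if not lines:
--             return []
--         head = lines[0]
--         r = head.rstrip()
--         if r.endswith(' _'):
--             pre = r[:-2]
--             rest = go(lines[1:])
--             if rest:
--                 return [pre + rest[0]] + rest[1:]
--             return [pre] if pre else []
--         return [head] + go(lines[1:])
--     return '\n'.join(go(s.split('\n')))
-- ===== Notes on version B (the rewrite author's own statement) =====
-- stated objective: alternative
-- what changed: Replaces A's imperative loop that threads a pending-buffer and output-list pair by a structural recursion over the lines that merges each continuation line's stripped prefix into the head of the recursively processed tail.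
import Mathlib
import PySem

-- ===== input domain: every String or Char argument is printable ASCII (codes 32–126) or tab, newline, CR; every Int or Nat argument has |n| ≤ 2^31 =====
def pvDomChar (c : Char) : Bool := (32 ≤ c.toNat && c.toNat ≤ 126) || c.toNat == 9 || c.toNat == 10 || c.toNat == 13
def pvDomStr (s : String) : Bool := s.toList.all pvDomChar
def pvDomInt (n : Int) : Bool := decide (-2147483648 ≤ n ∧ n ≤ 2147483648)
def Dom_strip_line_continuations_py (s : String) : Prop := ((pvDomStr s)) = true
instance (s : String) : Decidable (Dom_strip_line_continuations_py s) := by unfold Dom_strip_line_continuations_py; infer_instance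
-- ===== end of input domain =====

-- B replaces A's loop with buffer+output accumulators by a structural recursion that merges a
-- continuation prefix into the head of the recursively processed tail (objective: alternative).

-- ===== PORT A =====
-- step of A's for-loop: state is (out, buf)
def pvAStep (st : List (List Char) × List Char) (ln : List Char) :
    List (List Char) × List Char :=
  let r := PySem.Chars.rstrip ln
  if PySem.Chars.endswith r [' ', '_'] = true then
    (st.1, st.2 ++ PySem.Chars.slice r none (some (-2)))
  else
    if st.2 ≠ [] then (st.1 ++ [st.2 ++ ln], []) else (st.1 ++ [ln], [])

def strip_line_continuations_py (s : String) : String :=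
  let lines := PySem.Chars.splitOn s.toList ['\n']
  let st := lines.foldl pvAStep ([], [])
  let out := if st.2 ≠ [] then st.1 ++ [st.2] else st.1
  String.ofList (PySem.Chars.join ['\n'] out)

-- ===== PORT B =====
-- recursive joiner from Source B: a continuation line's stripped prefix is glued onto the
-- head of the processed tail; an empty dangling prefix disappears
def pvBGo : List (List Char) → List (List Char)
  | [] => []
  | ln :: rest =>
    let r := PySem.Chars.rstrip ln
    if PySem.Chars.endswith r [' ', '_'] = true then
      let pre := PySem.Chars.slice r none (some (-2))
      match pvBGo rest with
      | h :: t => (pre ++ h) :: t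
      | [] => if pre ≠ [] then [pre] else []
    else ln :: pvBGo rest

def strip_line_continuations_py_alt (s : String) : String :=
  String.ofList (PySem.Chars.join ['\n'] (pvBGo (PySem.Chars.splitOn s.toList ['\n'])))

-- ===== PRECONDITION & SPEC =====
def Spec_strip_line_continuations_py (s : String) (out : String) : Prop := out = strip_line_continuations_py_alt s
instance (s : String) (out : String) : Decidable (Spec_strip_line_continuations_py s out) := by unfold Spec_strip_line_continuations_py; infer_instance

-- ===== CLAIM (what is proved, stated in full; the proofs are below) =====
def Claim_equal_strip_line_continuations_py : Prop := ∀ (s : String), Dom_strip_line_continuations_py s → Spec_strip_line_continuations_py s (strip_line_continuations_py s)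

-- ===== LEMMAS AND PROOFS =====

-- "prepend a pending buffer onto the processed tail", the bridge between the two shapes
def pvPrepend (buf : List Char) : List (List Char) → List (List Char)
  | [] => if buf ≠ [] then [buf] else []
  | h :: t => (buf ++ h) :: t

theorem pvLoop_eq_go (lines : List (List Char)) :
    ∀ (out : List (List Char)) (buf : List Char),
      (let st := lines.foldl pvAStep (out, buf)
       if st.2 ≠ [] then st.1 ++ [st.2] else st.1) = out ++ pvPrepend buf (pvBGo lines) := by
  induction lines with
  | nil =>
      intro out buf
      simp only [List.foldl_nil, pvBGo, pvPrepend]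
      by_cases h : buf = [] <;> simp [h]
  | cons ln rest ih =>
      intro out buf
      simp only [List.foldl_cons, pvBGo]
      by_cases hc : PySem.Chars.endswith (PySem.Chars.rstrip ln) [' ', '_'] = true
      · -- continuation line
        rw [show pvAStep (out, buf) ln
              = (out, buf ++ PySem.Chars.slice (PySem.Chars.rstrip ln) none (some (-2)))
            from by simp [pvAStep, hc]]
        rw [ih out (buf ++ PySem.Chars.slice (PySem.Chars.rstrip ln) none (some (-2)))]
        simp only [hc, if_pos]
        cases hgo : pvBGo rest with
        | cons h t => simp [pvPrepend]
        | nil =>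
            set pre := PySem.Chars.slice (PySem.Chars.rstrip ln) none (some (-2)) with hpre
            by_cases hp : pre = []
            · by_cases hb : buf = [] <;> simp [pvPrepend, hp, hb]
            · have : buf ++ pre ≠ [] := by simp [hp]
              simp [pvPrepend, hp, this]
      · -- ordinary line: both branches of A collapse to appending buf ++ ln
        have hstep : pvAStep (out, buf) ln = (out ++ [buf ++ ln], []) := by
          by_cases hb : buf = [] <;> simp [pvAStep, hc, hb]
        rw [hstep, ih (out ++ [buf ++ ln]) []]
        simp only [hc]
        cases hgo : pvBGo rest with
        | nil => simp [pvPrepend]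
        | cons h t => simp [pvPrepend]

-- ===== VERDICT (by name: the statement is the Claim_ definition above) =====
theorem strip_line_continuations_py_spec : Claim_equal_strip_line_continuations_py := by
  intro s _
  unfold Spec_strip_line_continuations_py strip_line_continuations_py strip_line_continuations_py_alt
  simp only []
  rw [pvLoop_eq_go (PySem.Chars.splitOn s.toList ['\n']) [] []]
  cases hgo : pvBGo (PySem.Chars.splitOn s.toList ['\n']) <;> simp [pvPrepend]
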